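-- pv_equiv track=rewrite | github.com/resumeitai/ats-backed | ats_checker/nlp/text_analyzer.py | identify_skills_gap
-- ===== SOURCE A (Python) =====
-- from typing import Any, Dict, List, Optional
--
-- def identify_skills_gap(
--
--     resume_keywords: List[dict],
--     job_keywords: List[dict],
-- ) -> List[dict]:
--     """
--     Identify skills present in the job description but missing from the
--     resume.
--
--     Args:
--         resume_keywords: Output of ``SpaCyKeywordExtractor.extract_keywords``
--                          run on the resume text.
--         job_keywords:    Output of ``SpaCyKeywordExtractor.extract_keywords``
--                          run on the job description.
--
--     Returns:
--         List of dicts with keys: keyword, importance, category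
--         sorted by importance (high first).
--     """
--     resume_kw_set = {kw["keyword"].lower() for kw in resume_keywords}
--
--     missing = []
--     for jk in job_keywords:
--         if jk["keyword"].lower() not in resume_kw_set:
--             missing.append(
--                 {
--                     "keyword": jk["keyword"],
--                     "importance": jk.get("importance", "low"),
--                     "category": jk.get("category", "general"),
--                 }
--             )
--
--     # Sort by importance
--     importance_order = {"high": 0, "medium": 1, "low": 2}
--     missing.sort(key=lambda m: importance_order.get(m["importance"], 3))
--     return missing
-- ===== SOURCE B (Python) =====
-- def identify_skills_gap(
--     resume_keywords,
--     job_keywords,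
-- ):
--     """Same gap report as A, but a four-bucket counting pass replaces the
--     comparison sort: Python's sort is stable, so grouping the missing
--     keywords by importance tier in encounter order is the same list."""
--     resume_kw_set = {kw["keyword"].lower() for kw in resume_keywords}
--
--     high, medium, low, other = [], [], [], []
--     for jk in job_keywords:
--         if jk["keyword"].lower() in resume_kw_set:
--             continue
--         entry = {
--             "keyword": jk["keyword"],
--             "importance": jk.get("importance", "low"),
--             "category": jk.get("category", "general"),
--         }
--         imp = entry["importance"]
--         if imp == "high":
--             high.append(entry)
--         elif imp == "medium":
--             medium.append(entry)
--         elif imp == "low":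
--             low.append(entry)
--         else:
--             other.append(entry)
--     return high + medium + low + other
-- ===== Notes on version B (the rewrite author's own statement) =====
-- stated objective: alternative
-- what changed: Replaces the comparison sort keyed by an importance-rank dict with a single-pass counting sort into four fixed ordered buckets (high/medium/low/other) concatenated at the end; stability of Python's sort makes the results identical.
import Mathlib
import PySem

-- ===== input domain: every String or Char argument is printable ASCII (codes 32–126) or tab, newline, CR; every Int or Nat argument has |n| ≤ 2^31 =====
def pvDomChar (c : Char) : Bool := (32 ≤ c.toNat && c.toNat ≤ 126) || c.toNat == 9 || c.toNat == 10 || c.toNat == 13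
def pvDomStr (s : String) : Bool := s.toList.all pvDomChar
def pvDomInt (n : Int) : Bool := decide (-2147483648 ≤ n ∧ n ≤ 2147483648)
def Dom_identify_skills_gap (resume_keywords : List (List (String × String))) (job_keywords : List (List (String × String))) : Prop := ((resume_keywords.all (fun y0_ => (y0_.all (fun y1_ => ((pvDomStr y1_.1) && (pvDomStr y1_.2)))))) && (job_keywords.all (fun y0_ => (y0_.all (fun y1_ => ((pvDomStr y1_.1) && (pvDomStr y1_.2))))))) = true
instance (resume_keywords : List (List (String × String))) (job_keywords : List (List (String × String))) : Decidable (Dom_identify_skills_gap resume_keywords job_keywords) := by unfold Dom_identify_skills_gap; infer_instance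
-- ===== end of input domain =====

-- B replaces A's comparison sort by a stable four-bucket counting pass; same output.

-- ===== PORT A =====
-- kw["keyword"]: exact under Pre_ (the key is present, so no KeyError is reached)
def pvKw (d : List (String × String)) : String :=
  ((PySem.Dict.mk d).get? "keyword").getD ""

-- the dict literal A appends to `missing`
def pvEntry (jk : List (String × String)) : List (String × String) :=
  [("keyword", pvKw jk),
   ("importance", (PySem.Dict.mk jk).getD "importance" "low"),
   ("category", (PySem.Dict.mk jk).getD "category" "general")]

-- importance_order.get(m["importance"], 3) (m always carries "importance", so get is exact)
def pvRankKey (m : List (String × String)) : Int :=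
  (PySem.Dict.mk [("high", (0 : Int)), ("medium", 1), ("low", 2)]).getD
    (((PySem.Dict.mk m).get? "importance").getD "") 3

def identify_skills_gap (resume_keywords : List (List (String × String))) (job_keywords : List (List (String × String))) : List (List (String × String)) :=
  let resume_kw_set : PySem.Set String :=
    resume_keywords.foldl (fun s kw => PySem.Set.add s (PySem.Str.lower (pvKw kw))) PySem.Set.empty
  let missing : List (List (String × String)) :=
    job_keywords.foldl
      (fun acc jk =>
        if PySem.Set.contains resume_kw_set (PySem.Str.lower (pvKw jk)) then acc
        else acc ++ [pvEntry jk]) []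
  PySem.List.sorted missing pvRankKey false

-- ===== PORT B =====
def identify_skills_gap_alt (resume_keywords : List (List (String × String))) (job_keywords : List (List (String × String))) : List (List (String × String)) :=
  let resume_kw_set : PySem.Set String :=
    PySem.Set.ofList (resume_keywords.map (fun kw => PySem.Str.lower (pvKw kw)))
  let st :=
    job_keywords.foldl
      (fun st jk =>
        if PySem.Set.contains resume_kw_set (PySem.Str.lower (pvKw jk)) then st
        else
          let e := pvEntry jk
          let imp := (PySem.Dict.mk jk).getD "importance" "low"
          if imp == "high" then (st.1 ++ [e], st.2.1, st.2.2.1, st.2.2.2)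
          else if imp == "medium" then (st.1, st.2.1 ++ [e], st.2.2.1, st.2.2.2)
          else if imp == "low" then (st.1, st.2.1, st.2.2.1 ++ [e], st.2.2.2)
          else (st.1, st.2.1, st.2.2.1, st.2.2.2 ++ [e]))
      ([], [], [], [])
  st.1 ++ st.2.1 ++ st.2.2.1 ++ st.2.2.2

-- ===== PRECONDITION & SPEC =====
-- Pre_ excludes exactly the inputs on which A raises KeyError: a dict without the
-- "keyword" key (B raises there as well).
def Pre_identify_skills_gap (resume_keywords : List (List (String × String))) (job_keywords : List (List (String × String))) : Prop :=
  ((resume_keywords.all (fun d => d.any (fun p => p.1 == "keyword"))) &&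
   (job_keywords.all (fun d => d.any (fun p => p.1 == "keyword")))) = true
instance (resume_keywords : List (List (String × String))) (job_keywords : List (List (String × String))) : Decidable (Pre_identify_skills_gap resume_keywords job_keywords) := by unfold Pre_identify_skills_gap; infer_instance

def pvWitness_identify_skills_gap : (List (List (String × String))) × (List (List (String × String))) :=
  ([[("keyword", "Python")]],
   [[("keyword", "python")], [("keyword", "sql"), ("importance", "high")], [("keyword", "git"), ("importance", "urgent")]])

def Spec_identify_skills_gap (resume_keywords : List (List (String × String))) (job_keywords : List (List (String × String))) (out : List (List (String × String))) : Prop := out = identify_skills_gap_alt resume_keywords job_keywords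
instance (resume_keywords : List (List (String × String))) (job_keywords : List (List (String × String))) (out : List (List (String × String))) : Decidable (Spec_identify_skills_gap resume_keywords job_keywords out) := by unfold Spec_identify_skills_gap; infer_instance

-- ===== CLAIM (what is proved, stated in full; the proofs are below) =====
def Claim_equal_identify_skills_gap : Prop := ∀ (resume_keywords : List (List (String × String))) (job_keywords : List (List (String × String))), Dom_identify_skills_gap resume_keywords job_keywords → Pre_identify_skills_gap resume_keywords job_keywords → Spec_identify_skills_gap resume_keywords job_keywords (identify_skills_gap resume_keywords job_keywords)



-- insertBy places x after a block it does not go before and in front of a block it does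
theorem pv_insertBy_between {α : Type} (before : α → α → Bool) (x : α) (A B : List α)
    (hA : ∀ a ∈ A, before x a = false) (hB : ∀ b ∈ B, before x b = true) :
    PySem.List.insertBy before x (A ++ B) = A ++ x :: B := by
  induction A with
  | nil =>
      cases B with
      | nil => rfl
      | cons b B' =>
          simp only [List.nil_append, PySem.List.insertBy, hB b (by simp)]
          simp
  | cons a A' ih =>
      simp only [List.cons_append, PySem.List.insertBy, hA a (by simp)]
      simp only [Bool.false_eq_true, if_false]
      rw [ih (fun a ha => hA a (by simp [ha]))]

theorem pv_insertBy_rank (x : List (String × String)) (A B : List (List (String × String)))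
    (hA : ∀ a ∈ A, ¬ pvRankKey x < pvRankKey a) (hB : ∀ b ∈ B, pvRankKey x < pvRankKey b) :
    PySem.List.insertBy (fun a b => decide (pvRankKey a < pvRankKey b)) x (A ++ B) = A ++ x :: B :=
  pv_insertBy_between _ x A B (fun a ha => by simp [hA a ha]) (fun b hb => by simp [hB b hb])

-- the rank key takes only the values 0,1,2,3
theorem pvRankKey_mem (m : List (String × String)) :
    pvRankKey m = 0 ∨ pvRankKey m = 1 ∨ pvRankKey m = 2 ∨ pvRankKey m = 3 := by
  unfold pvRankKey
  simp only [PySem.Dict.getD_eq_get?_getD, PySem.Dict.get?_mk_cons]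
  split_ifs <;> simp [PySem.Dict.get?]

-- stable sort by a {0,1,2,3}-valued key is the concatenation of the four rank buckets
theorem pv_sorted_buckets (xs : List (List (String × String))) :
    PySem.List.sorted xs pvRankKey false =
      xs.filter (fun x => pvRankKey x == 0) ++ xs.filter (fun x => pvRankKey x == 1) ++
      xs.filter (fun x => pvRankKey x == 2) ++ xs.filter (fun x => pvRankKey x == 3) := by
  rw [PySem.List.sorted_eq_foldl_insertBy]
  induction xs using List.reverseRecOn with
  | nil => rfl
  | append_singleton xs x ih =>
      rw [List.foldl_append, List.foldl_cons, List.foldl_nil, ih]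
      simp only [List.filter_append, List.filter_cons, List.filter_nil]
      rcases pvRankKey_mem x with h | h | h | h <;> simp only [h] <;> norm_num
      · simpa [List.append_assoc] using
          pv_insertBy_rank x (xs.filter (fun x => pvRankKey x == 0))
            (xs.filter (fun x => pvRankKey x == 1) ++
              (xs.filter (fun x => pvRankKey x == 2) ++ xs.filter (fun x => pvRankKey x == 3)))
            (by intro a ha; simp only [List.mem_filter, beq_iff_eq] at ha; omega)
            (by intro b hb
                simp only [List.mem_append, List.mem_filter, beq_iff_eq] at hb
                rcases hb with ⟨_, h1⟩ | ⟨_, h1⟩ | ⟨_, h1⟩ <;> omega)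
      · simpa [List.append_assoc] using
          pv_insertBy_rank x
            (xs.filter (fun x => pvRankKey x == 0) ++ xs.filter (fun x => pvRankKey x == 1))
            (xs.filter (fun x => pvRankKey x == 2) ++ xs.filter (fun x => pvRankKey x == 3))
            (by intro a ha
                simp only [List.mem_append, List.mem_filter, beq_iff_eq] at ha
                rcases ha with ⟨_, h1⟩ | ⟨_, h1⟩ <;> omega)
            (by intro b hb
                simp only [List.mem_append, List.mem_filter, beq_iff_eq] at hb
                rcases hb with ⟨_, h1⟩ | ⟨_, h1⟩ <;> omega)
      · simpa [List.append_assoc] using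
          pv_insertBy_rank x
            (xs.filter (fun x => pvRankKey x == 0) ++
              (xs.filter (fun x => pvRankKey x == 1) ++ xs.filter (fun x => pvRankKey x == 2)))
            (xs.filter (fun x => pvRankKey x == 3))
            (by intro a ha
                simp only [List.mem_append, List.mem_filter, beq_iff_eq] at ha
                rcases ha with ⟨_, h1⟩ | ⟨_, h1⟩ | ⟨_, h1⟩ <;> omega)
            (by intro b hb; simp only [List.mem_filter, beq_iff_eq] at hb; omega)
      · simpa [List.append_assoc] using
          pv_insertBy_rank x
            (xs.filter (fun x => pvRankKey x == 0) ++
              (xs.filter (fun x => pvRankKey x == 1) ++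
                (xs.filter (fun x => pvRankKey x == 2) ++ xs.filter (fun x => pvRankKey x == 3))))
            []
            (by intro a ha
                simp only [List.mem_append, List.mem_filter, beq_iff_eq] at ha
                rcases ha with ⟨_, h1⟩ | ⟨_, h1⟩ | ⟨_, h1⟩ | ⟨_, h1⟩ <;> omega)
            (by intro b hb; simp at hb)

-- the importance-order lookup, in terms of equality tests on the importance string
theorem pv_order_getD (imp : String) :
    (PySem.Dict.mk [("high", (0 : Int)), ("medium", 1), ("low", 2)]).getD imp 3 =
      (if imp == "high" then 0 else if imp == "medium" then 1 else if imp == "low" then 2 else 3) := by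
  by_cases e1 : imp = "high"
  · subst e1; decide
  by_cases e2 : imp = "medium"
  · subst e2; decide
  by_cases e3 : imp = "low"
  · subst e3; decide
  simp only [beq_iff_eq, e1, e2, e3, if_false]
  simp only [PySem.Dict.getD_eq_get?_getD, PySem.Dict.get?_mk_cons, beq_iff_eq]
  rw [if_neg (fun h => e1 h.symm), if_neg (fun h => e2 h.symm), if_neg (fun h => e3 h.symm)]
  simp [PySem.Dict.get?]

-- the entry always carries its importance string at key "importance"
theorem pv_get?_entry (jk : List (String × String)) :
    (PySem.Dict.mk (pvEntry jk)).get? "importance" =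
      some ((PySem.Dict.mk jk).getD "importance" "low") := by
  simp only [pvEntry, PySem.Dict.get?_mk_cons,
    show (("keyword" : String) == "importance") = false by decide,
    show (("importance" : String) == "importance") = true by decide]
  simp

-- the rank of the entry built from jk, in terms of jk's importance string
theorem pvRankKey_entry (jk : List (String × String)) :
    pvRankKey (pvEntry jk) =
      (if (PySem.Dict.mk jk).getD "importance" "low" == "high" then 0
       else if (PySem.Dict.mk jk).getD "importance" "low" == "medium" then 1
       else if (PySem.Dict.mk jk).getD "importance" "low" == "low" then 2 else 3) := by
  unfold pvRankKey
  rw [pv_get?_entry]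
  simp only [Option.getD_some]
  exact pv_order_getD _

-- A's missing-collection loop, as filter-then-map
theorem pv_missing_loop (s : PySem.Set String) (jks : List (List (String × String)))
    (acc : List (List (String × String))) :
    jks.foldl
      (fun acc jk =>
        if PySem.Set.contains s (PySem.Str.lower (pvKw jk)) then acc
        else acc ++ [pvEntry jk]) acc =
    acc ++ (jks.filter (fun jk => !PySem.Set.contains s (PySem.Str.lower (pvKw jk)))).map pvEntry := by
  induction jks generalizing acc with
  | nil => simp
  | cons jk jks ih =>
      rw [List.foldl_cons, List.filter_cons]
      by_cases hc : PySem.Set.contains s (PySem.Str.lower (pvKw jk)) = true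
      · rw [if_pos hc, ih]
        simp only [hc, Bool.not_true, Bool.false_eq_true, if_false]
      · simp only [Bool.not_eq_true] at hc
        rw [if_neg (by simpa using hc), ih]
        simp only [hc, Bool.not_false, if_true, List.map_cons, List.append_assoc,
          List.singleton_append]

-- B's bucket loop appends each bucket's rank-filter of the missing list
theorem pv_bucket_loop (s : PySem.Set String) (jks : List (List (String × String)))
    (h m l o : List (List (String × String))) :
    jks.foldl
      (fun st jk =>
        if PySem.Set.contains s (PySem.Str.lower (pvKw jk)) then st
        else
          let e := pvEntry jk
          let imp := (PySem.Dict.mk jk).getD "importance" "low"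
          if imp == "high" then (st.1 ++ [e], st.2.1, st.2.2.1, st.2.2.2)
          else if imp == "medium" then (st.1, st.2.1 ++ [e], st.2.2.1, st.2.2.2)
          else if imp == "low" then (st.1, st.2.1, st.2.2.1 ++ [e], st.2.2.2)
          else (st.1, st.2.1, st.2.2.1, st.2.2.2 ++ [e]))
      (h, m, l, o) =
    (h ++ ((jks.filter (fun jk => !PySem.Set.contains s (PySem.Str.lower (pvKw jk)))).map pvEntry).filter
            (fun x => pvRankKey x == 0),
     m ++ ((jks.filter (fun jk => !PySem.Set.contains s (PySem.Str.lower (pvKw jk)))).map pvEntry).filter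
            (fun x => pvRankKey x == 1),
     l ++ ((jks.filter (fun jk => !PySem.Set.contains s (PySem.Str.lower (pvKw jk)))).map pvEntry).filter
            (fun x => pvRankKey x == 2),
     o ++ ((jks.filter (fun jk => !PySem.Set.contains s (PySem.Str.lower (pvKw jk)))).map pvEntry).filter
            (fun x => pvRankKey x == 3)) := by
  induction jks generalizing h m l o with
  | nil => simp
  | cons jk jks ih =>
      rw [List.foldl_cons, List.filter_cons]
      by_cases hc : PySem.Set.contains s (PySem.Str.lower (pvKw jk)) = true
      · rw [if_pos hc, ih]
        simp only [hc, Bool.not_true, Bool.false_eq_true, if_false]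
      · simp only [Bool.not_eq_true] at hc
        rw [if_neg (by simpa using hc)]
        have hr := pvRankKey_entry jk
        simp only [hc, Bool.not_false, if_true, List.map_cons]
        by_cases h1 : ((PySem.Dict.mk jk).getD "importance" "low" == "high") = true
        · simp only [h1, if_true] at hr ⊢
          rw [ih]
          simp only [List.filter_cons, hr]
          norm_num [List.append_assoc]
        · simp only [h1, Bool.false_eq_true, if_false] at hr ⊢
          by_cases h2 : ((PySem.Dict.mk jk).getD "importance" "low" == "medium") = true
          · simp only [h2, if_true] at hr ⊢
            rw [ih]
            simp only [List.filter_cons, hr]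
            norm_num [List.append_assoc]
          · simp only [h2, Bool.false_eq_true, if_false] at hr ⊢
            by_cases h3 : ((PySem.Dict.mk jk).getD "importance" "low" == "low") = true
            · simp only [h3, if_true] at hr ⊢
              rw [ih]
              simp only [List.filter_cons, hr]
              norm_num [List.append_assoc]
            · simp only [h3, Bool.false_eq_true, if_false] at hr ⊢
              rw [ih]
              simp only [List.filter_cons, hr]
              norm_num [List.append_assoc]

-- ===== VERDICT (by name: the statement is the Claim_ definition above) =====
theorem identify_skills_gap_spec : Claim_equal_identify_skills_gap := by
  intro rk jks _ _
  unfold Spec_identify_skills_gap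
  simp only [identify_skills_gap, identify_skills_gap_alt]
  rw [← PySem.Set.update_map_eq_foldl_add, PySem.Set.update_empty]
  rw [pv_missing_loop, pv_bucket_loop, pv_sorted_buckets]
  simp only [List.nil_append, List.append_assoc]
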